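-- pv_equiv track=rewrite | github.com/Seshadri-JAI/jai-planner-backend | services/planning_service.py | apply_stage_constraint
-- ===== SOURCE A (Python) =====
-- def apply_stage_constraint(stage_plan):
--
--     ordered_stages = ["SPVC", "Parabolic", "BHT", "HT", "SSP", "Paint"]
--
--     constrained = {}
--
--     prev_output = None
--
--     for stage in ordered_stages:
--
--         planned = stage_plan.get(stage, 0)
--
--         if prev_output is None:
--             constrained[stage] = planned
--         else:
--             constrained[stage] = min(planned, prev_output)
--
--         prev_output = constrained[stage]
--
--     return constrained
-- ===== SOURCE B (Python) =====
-- def apply_stage_constraint(stage_plan):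
--     ordered_stages = ["SPVC", "Parabolic", "BHT", "HT", "SSP", "Paint"]
--     return {
--         stage: min(stage_plan.get(t, 0) for t in ordered_stages[: i + 1])
--         for i, stage in enumerate(ordered_stages)
--     }
-- ===== Notes on version B (the rewrite author's own statement) =====
-- stated objective: alternative
-- what changed: Replaces the single stateful pass carrying prev_output by a stateless per-stage computation: each stage's value is min() over the prefix slice of looked-up values (nested scans, no carried state).
import Mathlib
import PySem

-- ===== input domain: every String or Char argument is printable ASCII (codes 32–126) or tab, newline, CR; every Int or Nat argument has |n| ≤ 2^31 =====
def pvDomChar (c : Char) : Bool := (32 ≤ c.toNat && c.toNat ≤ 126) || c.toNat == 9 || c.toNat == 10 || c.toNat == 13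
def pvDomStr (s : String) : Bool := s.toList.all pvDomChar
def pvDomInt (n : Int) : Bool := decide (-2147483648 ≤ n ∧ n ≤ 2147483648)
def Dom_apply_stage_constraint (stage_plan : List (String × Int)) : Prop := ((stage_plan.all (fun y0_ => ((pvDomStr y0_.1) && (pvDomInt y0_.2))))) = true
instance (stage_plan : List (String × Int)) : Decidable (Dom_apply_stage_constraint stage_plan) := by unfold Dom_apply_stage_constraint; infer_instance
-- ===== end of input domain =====

-- B drops the carried prev_output: each stage's value is computed independently as min() over the prefix slice of looked-up values; objective: alternative.

-- ===== PORT A =====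
def pvStagesA : List String := ["SPVC", "Parabolic", "BHT", "HT", "SSP", "Paint"]

def apply_stage_constraint (stage_plan : List (String × Int)) : List (String × Int) :=
  let step := fun (st : PySem.Dict String Int × Option Int) (stage : String) =>
    let planned := (PySem.Dict.mk stage_plan).getD stage 0
    let v := match st.2 with
      | none => planned
      | some p => min planned p
    (st.1.insert stage v, some v)
  (pvStagesA.foldl step (PySem.Dict.mk [], none)).1.items

-- ===== PORT B =====
def pvStagesB : List String := ["SPVC", "Parabolic", "BHT", "HT", "SSP", "Paint"]

-- min(generator) over a nonempty prefix: first element, then fold min over the rest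
-- (the prefixes ordered_stages[:i+1] are always nonempty, so Python's min never raises).
def pvMinList (xs : List Int) : Int :=
  match xs with
  | [] => 0
  | x :: rest => rest.foldl min x

def apply_stage_constraint_alt (stage_plan : List (String × Int)) : List (String × Int) :=
  (PySem.List.enumerate pvStagesB).foldl
    (fun (d : PySem.Dict String Int) (p : Int × String) =>
      d.insert p.2
        (pvMinList ((PySem.List.slice pvStagesB none (some (p.1 + 1))).map
          (fun t => (PySem.Dict.mk stage_plan).getD t 0))))
    (PySem.Dict.mk []) |>.items

-- ===== PRECONDITION & SPEC =====
def Spec_apply_stage_constraint (stage_plan : List (String × Int)) (out : List (String × Int)) : Prop := out = apply_stage_constraint_alt stage_plan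
instance (stage_plan : List (String × Int)) (out : List (String × Int)) : Decidable (Spec_apply_stage_constraint stage_plan out) := by unfold Spec_apply_stage_constraint; infer_instance

-- ===== CLAIM (what is proved, stated in full; the proofs are below) =====
def Claim_equal_apply_stage_constraint : Prop := ∀ (stage_plan : List (String × Int)), Dom_apply_stage_constraint stage_plan → Spec_apply_stage_constraint stage_plan (apply_stage_constraint stage_plan)

-- ===== LEMMAS AND PROOFS =====
theorem apply_stage_constraint_eq (stage_plan : List (String × Int)) :
    apply_stage_constraint stage_plan = apply_stage_constraint_alt stage_plan := by
  simp [apply_stage_constraint, apply_stage_constraint_alt, pvStagesA, pvStagesB,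
    pvMinList, PySem.List.enumerate, PySem.List.slice, PySem.Dict.insert,
    min_comm, min_left_comm, min_assoc]

-- ===== VERDICT (by name: the statement is the Claim_ definition above) =====
theorem apply_stage_constraint_spec : Claim_equal_apply_stage_constraint := by
  intro sp _
  exact apply_stage_constraint_eq sp
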